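-- pv_equiv track=rewrite | github.com/KirstineInvierno/Coding-problems | codewars-challenges/simple_simple_simple_string_expansion.py | string_expansion
-- ===== SOURCE A (Python) =====
-- def string_expansion(s:str)->str:
--     multiplier = 1
--     expanded = ""
--
--     for char in s:
--         if char.isdigit():
--             multiplier = int(char)
--         if char.isalpha():
--             expanded += (multiplier * char)
--     return expanded
-- ===== SOURCE B (Python) =====
-- def string_expansion(s: str) -> str:
--     # tokenize first: each digit is its own token, maximal runs of non-digits are text tokens
--     tokens = []
--     cur = ""
--     for ch in s:
--         if ch.isdigit():
--             if cur:
--                 tokens.append(cur)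
--                 cur = ""
--             tokens.append(ch)
--         else:
--             cur += ch
--     if cur:
--         tokens.append(cur)
--     parts = []
--     mult = 1
--     for tok in tokens:
--         if tok.isdigit():
--             mult = int(tok)
--         else:
--             for ch in tok:
--                 if ch.isalpha():
--                     parts.append(mult * ch)
--     return "".join(parts)
-- ===== Notes on version B (the rewrite author's own statement) =====
-- stated objective: alternative
-- what changed: B tokenizes the string first into single-digit tokens and maximal non-digit text segments, then expands each text segment under the multiplier set by the preceding digit token and joins collected parts, instead of A's char-by-char fold with string concatenation.
import Mathlib
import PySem

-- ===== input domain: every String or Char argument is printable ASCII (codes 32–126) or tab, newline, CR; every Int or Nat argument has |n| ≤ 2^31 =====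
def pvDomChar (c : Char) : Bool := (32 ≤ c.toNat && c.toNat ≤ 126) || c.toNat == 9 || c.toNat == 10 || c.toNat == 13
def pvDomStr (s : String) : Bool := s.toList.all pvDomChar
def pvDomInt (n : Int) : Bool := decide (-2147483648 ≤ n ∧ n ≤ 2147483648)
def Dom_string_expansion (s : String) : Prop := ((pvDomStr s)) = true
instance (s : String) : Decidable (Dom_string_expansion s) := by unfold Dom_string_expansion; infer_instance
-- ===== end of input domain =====

-- B tokenizes the string first (single-digit tokens / maximal non-digit text segments) and
-- expands each text segment under the multiplier set by the preceding digit token,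
-- instead of A's char-by-char fold. Objective: alternative decomposition, same cost.

-- ===== PORT A =====
-- A's for-loop over the characters, carrying (multiplier, expanded).
-- `int(char)` (guarded by isdigit, so it always succeeds) is PySem.Int.ofChars? [c];
-- `multiplier * char` is PySem.List.pyRepeat [c] m.
def pvALoop : List Char → Int → List Char → List Char
  | [], _, exp => exp
  | c :: cs, m, exp =>
    let m' := if PySem.Chars.isdigit c then (PySem.Int.ofChars? [c]).getD 0 else m
    let exp' := if PySem.Chars.isalpha c then exp ++ PySem.List.pyRepeat [c] m' else exp
    pvALoop cs m' exp'

def string_expansion (s : String) : String := String.mk (pvALoop s.toList 1 [])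

-- ===== PORT B =====
-- B's first loop: fold over the characters building (tokens, cur).
def pvTokStep (st : List (List Char) × List Char) (c : Char) : List (List Char) × List Char :=
  if PySem.Chars.isdigit c then
    ((if st.2 ≠ [] then st.1 ++ [st.2] else st.1) ++ [[c]], [])
  else (st.1, st.2 ++ [c])

def pvTokenize (cs : List Char) : List (List Char) :=
  let st := cs.foldl pvTokStep ([], [])
  if st.2 ≠ [] then st.1 ++ [st.2] else st.1

-- B's inner loop over one text token (the appended parts for that token, flattened).
def pvExpandTok (t : List Char) (m : Int) : List Char :=
  t.foldl (fun out c => if PySem.Chars.isalpha c then out ++ PySem.List.pyRepeat [c] m else out) []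

-- B's second loop over the tokens, carrying (mult, parts). `tok.isdigit()` on a token is
-- "nonempty and every char a digit" (exact Python str.isdigit semantics on ASCII tokens).
def pvBLoop : List (List Char) → Int → List Char → List Char
  | [], _, out => out
  | t :: ts, m, out =>
    if (decide (t ≠ []) && t.all PySem.Chars.isdigit) then
      pvBLoop ts ((PySem.Int.ofChars? t).getD 0) out
    else
      pvBLoop ts m (out ++ pvExpandTok t m)

def string_expansion_alt (s : String) : String := String.mk (pvBLoop (pvTokenize s.toList) 1 [])

-- ===== PRECONDITION & SPEC =====
def Spec_string_expansion (s : String) (out : String) : Prop := out = string_expansion_alt s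
instance (s : String) (out : String) : Decidable (Spec_string_expansion s out) := by unfold Spec_string_expansion; infer_instance

-- ===== CLAIM (what is proved, stated in full; the proofs are below) =====
def Claim_equal_string_expansion : Prop := ∀ (s : String), Dom_string_expansion s → Spec_string_expansion s (string_expansion s)

-- ===== LEMMAS AND PROOFS =====

theorem pv_digit_not_alpha (c : Char) (h : PySem.Chars.isdigit c = true) :
    PySem.Chars.isalpha c = false := by
  unfold PySem.Chars.isdigit PySem.Chars.isalpha PySem.Chars.isupper PySem.Chars.islower at *
  simp [Char.le_def, UInt32.le_iff_toNat_le] at *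
  omega

-- the foldl state splits: the already-collected tokens are only appended to
theorem pv_foldl_tok_split (cs : List Char) (ts : List (List Char)) (cur : List Char) :
    cs.foldl pvTokStep (ts, cur) =
      (ts ++ (cs.foldl pvTokStep ([], cur)).1, (cs.foldl pvTokStep ([], cur)).2) := by
  induction cs generalizing ts cur with
  | nil => simp
  | cons c cs ih =>
    simp only [List.foldl_cons]
    by_cases hd : PySem.Chars.isdigit c = true
    · by_cases hc : cur = []
      · subst hc
        rw [show pvTokStep (ts, []) c = (ts ++ [[c]], []) by simp [pvTokStep, hd],
            show pvTokStep (([] : List (List Char)), ([] : List Char)) c = ([[c]], []) by simp [pvTokStep, hd],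
            ih, ih [[c]] []]
        simp
      · rw [show pvTokStep (ts, cur) c = (ts ++ [cur] ++ [[c]], []) by simp [pvTokStep, hd, hc],
            show pvTokStep (([] : List (List Char)), cur) c = ([cur] ++ [[c]], []) by simp [pvTokStep, hd, hc],
            ih, ih ([cur] ++ [[c]]) []]
        simp
    · rw [show pvTokStep (ts, cur) c = (ts, cur ++ [c]) by simp [pvTokStep, hd],
          show pvTokStep (([] : List (List Char)), cur) c = ([], cur ++ [c]) by simp [pvTokStep, hd],
          ih, ih [] (cur ++ [c])]

-- pvExpandTok's accumulator shifts out of the fold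
theorem pv_expandTok_acc (t : List Char) (m : Int) (acc : List Char) :
    t.foldl (fun out c => if PySem.Chars.isalpha c then out ++ PySem.List.pyRepeat [c] m else out) acc
      = acc ++ pvExpandTok t m := by
  induction t generalizing acc with
  | nil => simp [pvExpandTok]
  | cons c t ih =>
    simp only [pvExpandTok, List.foldl_cons]
    rw [ih, ih (if PySem.Chars.isalpha c then [] ++ PySem.List.pyRepeat [c] m else [])]
    by_cases h : PySem.Chars.isalpha c = true <;> simp [h]

theorem pv_expandTok_snoc (t : List Char) (c : Char) (m : Int) :
    pvExpandTok (t ++ [c]) m =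
      pvExpandTok t m ++ (if PySem.Chars.isalpha c then PySem.List.pyRepeat [c] m else []) := by
  simp only [pvExpandTok, List.foldl_append, List.foldl_cons, List.foldl_nil]
  rw [pv_expandTok_acc]
  by_cases h : PySem.Chars.isalpha c = true <;> simp [h, pvExpandTok]

-- tokenization-from-state expressed on the final token list
def pvTokenizeFrom (cs : List Char) (cur : List Char) : List (List Char) :=
  let st := cs.foldl pvTokStep ([], cur)
  if st.2 ≠ [] then st.1 ++ [st.2] else st.1

-- MAIN INVARIANT: expanding the tokens of the rest (with pending text cur, which contains
-- no digits) from multiplier m equals A's loop over the rest, after flushing cur.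
theorem pv_main (cs : List Char) (m : Int) (cur out : List Char)
    (hcur : ∀ c ∈ cur, PySem.Chars.isdigit c = false) :
    pvBLoop (pvTokenizeFrom cs cur) m out = pvALoop cs m (out ++ pvExpandTok cur m) := by
  induction cs generalizing m cur out with
  | nil =>
    by_cases hc : cur = []
    · subst hc; simp [pvTokenizeFrom, pvBLoop, pvALoop, pvExpandTok]
    · have hall : cur.all PySem.Chars.isdigit = false := by
        obtain ⟨d, ds, rfl⟩ := List.exists_cons_of_ne_nil hc
        simp [hcur d (by simp)]
      simp [pvTokenizeFrom, hc, pvBLoop, hall, pvALoop]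
  | cons c cs ih =>
    by_cases hd : PySem.Chars.isdigit c = true
    · have hstep : pvTokenizeFrom (c :: cs) cur =
          (if cur ≠ [] then [cur] else []) ++ [[c]] ++ pvTokenizeFrom cs [] := by
        simp only [pvTokenizeFrom, List.foldl_cons]
        rw [show pvTokStep (([] : List (List Char)), cur) c =
              ((if cur ≠ [] then [cur] else []) ++ [[c]], []) by
            by_cases hc : cur = [] <;> simp [pvTokStep, hd, hc]]
        rw [pv_foldl_tok_split]
        by_cases h2 : (cs.foldl pvTokStep ([], ([] : List Char))).2 = [] <;> simp [h2]
      rw [hstep]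
      have hflush : ∀ o, pvBLoop ((if cur ≠ [] then [cur] else []) ++ [[c]] ++ pvTokenizeFrom cs []) m o
          = pvBLoop (pvTokenizeFrom cs []) ((PySem.Int.ofChars? [c]).getD 0) (o ++ pvExpandTok cur m) := by
        intro o
        by_cases hc : cur = []
        · subst hc; simp [pvBLoop, hd, pvExpandTok]
        · have hall : cur.all PySem.Chars.isdigit = false := by
            obtain ⟨d, ds, rfl⟩ := List.exists_cons_of_ne_nil hc
            simp [hcur d (by simp)]
          simp [pvBLoop, hc, hall, hd]
      rw [hflush, ih _ _ _ (by simp)]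
      simp only [pvALoop, hd, if_pos, pv_digit_not_alpha c hd]
      simp [pvExpandTok]
    · have hstep : pvTokenizeFrom (c :: cs) cur = pvTokenizeFrom cs (cur ++ [c]) := by
        simp only [pvTokenizeFrom, List.foldl_cons]
        rw [show pvTokStep (([] : List (List Char)), cur) c = ([], cur ++ [c]) by
              simp [pvTokStep, hd]]
      rw [hstep, ih m (cur ++ [c]) out (by
        intro x hx
        rcases List.mem_append.mp hx with h | h
        · exact hcur x h
        · simp at h; subst h; simpa using hd)]
      rw [pv_expandTok_snoc]
      simp only [pvALoop, hd]
      by_cases ha : PySem.Chars.isalpha c = true <;> simp [ha, List.append_assoc]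

-- ===== VERDICT (by name: the statement is the Claim_ definition above) =====
theorem string_expansion_spec : Claim_equal_string_expansion := by
  intro s _
  show string_expansion s = string_expansion_alt s
  unfold string_expansion string_expansion_alt
  have := pv_main s.toList 1 [] [] (by simp)
  simp [pvExpandTok] at this
  rw [show pvTokenize s.toList = pvTokenizeFrom s.toList [] from rfl, this]
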